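-- pv_equiv track=rewrite | github.com/arshiahemmat/grammer_to_RE | main.py | fu3
-- ===== SOURCE A (Python) =====
-- def fu3(q:list):
--     l =[]
--     for i in q :
--         if len(i)>1:
--             for j in i:
--                 l.append(j)
--         if len(i) == 1:
--             l.append(i)
--     q.clear()
--
--     for i in l :
--         q.append(i[0])
--
--     return q
-- ===== SOURCE B (Python) =====
-- def fu3(q: list):
--     # One pass: flatten each string straight to its characters (empty strings
--     # contribute nothing), then refill the same list object in place.
--     result = [c for s in q for c in s]
--     q[:] = result
--     return q
-- ===== Notes on version B (the rewrite author's own statement) =====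
-- stated objective: simpler
-- what changed: A builds an intermediate list (chars for long strings, the whole string for length-1 ones) and then projects [0] in a second pass; B flattens each string directly to its characters in a single comprehension and writes it back with q[:] = result.
import Mathlib
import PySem

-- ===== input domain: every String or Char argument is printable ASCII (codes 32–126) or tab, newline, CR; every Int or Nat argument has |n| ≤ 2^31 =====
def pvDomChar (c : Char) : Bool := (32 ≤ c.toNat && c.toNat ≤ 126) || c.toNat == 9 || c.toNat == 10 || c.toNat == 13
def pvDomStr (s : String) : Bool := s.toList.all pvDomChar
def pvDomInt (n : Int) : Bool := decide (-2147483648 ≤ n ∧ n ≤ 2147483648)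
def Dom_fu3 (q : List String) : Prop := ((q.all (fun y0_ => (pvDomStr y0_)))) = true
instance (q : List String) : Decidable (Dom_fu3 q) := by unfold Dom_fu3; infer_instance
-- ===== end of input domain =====

-- B fuses A's two passes: it flattens each string straight to its characters in one
-- comprehension instead of building A's intermediate list and projecting [0] afterwards.
-- Note: the Python A mutates q in place (clear + refill with the same object); B does the
-- same via q[:] = result — the equivalence proved here is about the returned value.

-- ===== PORT A =====
-- first loop body: build l (chars of long strings as 1-char strings; length-1 strings whole)
def fu3Step (l : List String) (i : String) : List String :=
  let l := if PySem.Str.len i > 1 then l ++ i.toList.map (fun j => String.ofList [j]) else l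
  if PySem.Str.len i = 1 then l ++ [i] else l

-- second loop body: q.append(i[0]); i[0] via PySem.Str.pyGet? (exact: every element of l is
-- nonempty, so the none/IndexError case is unreachable and appends nothing)
def fu3Proj (qs : List String) (i : String) : List String :=
  qs ++ ((PySem.Str.pyGet? i 0).map (fun c => String.ofList [c])).toList

def fu3 (q : List String) : List String :=
  let l := q.foldl fu3Step []
  l.foldl fu3Proj []

-- ===== PORT B =====
def fu3_alt (q : List String) : List String :=
  q.flatMap (fun s => s.toList.map (fun c => String.ofList [c]))

-- ===== PRECONDITION & SPEC =====
def Spec_fu3 (q : List String) (out : List String) : Prop := out = fu3_alt q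
instance (q : List String) (out : List String) : Decidable (Spec_fu3 q out) := by unfold Spec_fu3; infer_instance

-- ===== CLAIM (what is proved, stated in full; the proofs are below) =====
def Claim_equal_fu3 : Prop := ∀ (q : List String), Dom_fu3 q → Spec_fu3 q (fu3 q)

-- ===== LEMMAS AND PROOFS =====

-- one projected element: first character of s, as a 0/1-element list of 1-char strings
def fu3ProjOne (s : String) : List String :=
  ((PySem.Str.pyGet? s 0).map (fun c => String.ofList [c])).toList

theorem foldl_fu3Proj (l acc : List String) :
    l.foldl fu3Proj acc = acc ++ l.flatMap fu3ProjOne := by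
  induction l generalizing acc with
  | nil => simp
  | cons x xs ih => simp [fu3Proj, fu3ProjOne, ih, List.append_assoc]

theorem projOne_mk_single (c : Char) : fu3ProjOne (String.ofList [c]) = [String.ofList [c]] := by
  simp [fu3ProjOne, PySem.Str.pyGet?, PySem.Chars.pyGet?, PySem.List.pyGet?, PySem.List.pyIdx?]

theorem flatMap_projOne_step (acc : List String) (i : String) :
    (fu3Step acc i).flatMap fu3ProjOne
      = acc.flatMap fu3ProjOne ++ i.toList.map (fun c => String.ofList [c]) := by
  unfold fu3Step
  rcases h : i.toList with _ | ⟨c, _ | ⟨d, rest⟩⟩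
  · simp [PySem.Str.len_eq, h]
  · have hi : i = String.ofList [c] := by rw [← h, String.ofList_toList]
    simp [PySem.Str.len_eq, hi, projOne_mk_single]
  · have hlen : (1:Int) < PySem.Str.len i := by
      simp [PySem.Str.len_eq, h]
    have hne : PySem.Str.len i ≠ 1 := by omega
    simp only [if_pos hlen, if_neg hne, List.flatMap_append]
    simp only [List.flatMap_map, projOne_mk_single]
    rw [← List.map_eq_flatMap]

theorem flatMap_projOne_foldl (q acc : List String) :
    (q.foldl fu3Step acc).flatMap fu3ProjOne
      = acc.flatMap fu3ProjOne ++ q.flatMap (fun s => s.toList.map (fun c => String.ofList [c])) := by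
  induction q generalizing acc with
  | nil => simp
  | cons x xs ih => simp [ih, flatMap_projOne_step, List.append_assoc]

-- ===== VERDICT (by name: the statement is the Claim_ definition above) =====
theorem fu3_spec : Claim_equal_fu3 := by
  intro q _
  show fu3 q = fu3_alt q
  simp [fu3, fu3_alt, foldl_fu3Proj, flatMap_projOne_foldl]
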